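-- pv_equiv track=rewrite | github.com/yushundong/Spectral-benchmark | src/main_benchmark/compare_rankings.py | kt_distance
-- ===== SOURCE A (Python) =====
-- def kt_distance(perm1, perm2):  # kt = kendall tau
--     if len(perm1) != len(perm2):
--         raise ValueError("Permutations must have the same length")
--     n = len(perm1)
--     inversions = 0
--     for i in range(n):
--         for j in range(i + 1, n):
--             # Check if the relative order of elements i and j is different in perm1 and perm2
--             if (perm1[i] - perm1[j]) * (perm2[i] - perm2[j]) < 0:
--                 inversions += 1
--     return inversions
-- ===== SOURCE B (Python) =====
-- def kt_distance(perm1, perm2):  # kt = kendall tau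
--     if len(perm1) != len(perm2):
--         raise ValueError("Permutations must have the same length")
--     # Sort the pairs lexicographically; discordant pairs are then exactly the
--     # strict inversions of the second components, countable by merge sort.
--     seq = [b for _, b in sorted(zip(perm1, perm2))]
--
--     def sort_count(xs):
--         if len(xs) <= 1:
--             return xs, 0
--         mid = len(xs) // 2
--         left, cl = sort_count(xs[:mid])
--         right, cr = sort_count(xs[mid:])
--         merged = []
--         i = j = inv = 0
--         while i < len(left) and j < len(right):
--             if left[i] <= right[j]:
--                 merged.append(left[i])
--                 i += 1
--             else:
--                 merged.append(right[j])
--                 j += 1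
--                 inv += len(left) - i
--         merged.extend(left[i:])
--         merged.extend(right[j:])
--         return merged, cl + cr + inv
--
--     return sort_count(seq)[1]
-- ===== Notes on version B (the rewrite author's own statement) =====
-- stated objective: faster
-- what changed: Replaces the O(n^2) all-pairs sign test by sorting the (perm1,perm2) pairs lexicographically and counting strict inversions of the second components with a merge-sort inversion counter.
import Mathlib
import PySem

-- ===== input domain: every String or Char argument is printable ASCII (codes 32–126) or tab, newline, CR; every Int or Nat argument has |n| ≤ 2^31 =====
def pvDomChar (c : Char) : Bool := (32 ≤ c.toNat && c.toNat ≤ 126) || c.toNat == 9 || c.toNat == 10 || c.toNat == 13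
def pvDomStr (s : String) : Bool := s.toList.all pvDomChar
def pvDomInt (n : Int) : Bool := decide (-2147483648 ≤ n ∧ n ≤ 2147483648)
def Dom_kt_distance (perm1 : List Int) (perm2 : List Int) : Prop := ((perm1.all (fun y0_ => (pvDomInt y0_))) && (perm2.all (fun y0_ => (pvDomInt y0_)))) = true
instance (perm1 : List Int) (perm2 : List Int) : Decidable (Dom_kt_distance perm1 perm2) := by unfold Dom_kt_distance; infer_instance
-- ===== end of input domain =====

-- B sorts the (perm1,perm2) pairs lexicographically and counts strict inversions of the
-- second components with a merge-sort counter instead of A's all-pairs scan.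


-- ===== PORT A =====
-- Python raises ValueError on unequal lengths (excluded by Pre_); the port returns 0 there.
def kt_distance (perm1 : List Int) (perm2 : List Int) : Int :=
  if perm1.length ≠ perm2.length then 0
  else
    let n : Int := PySem.List.len perm1
    (PySem.List.pyRange 0 n 1).foldl (fun inv i =>
      (PySem.List.pyRange (i + 1) n 1).foldl (fun inv j =>
        if (PySem.List.pyGetD perm1 i 0 - PySem.List.pyGetD perm1 j 0) *
           (PySem.List.pyGetD perm2 i 0 - PySem.List.pyGetD perm2 j 0) < 0
        then inv + 1 else inv) inv) 0

-- ===== PORT B =====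
-- B's merge loop (the while over i, j), structurally recursive on the two lists
def ktMergeCnt : List Int → List Int → List Int × Int
  | [], ys => (ys, 0)
  | x :: xs, [] => (x :: xs, 0)
  | x :: xs, y :: ys =>
    if x ≤ y then
      let r := ktMergeCnt xs (y :: ys); (x :: r.1, r.2)
    else
      let r := ktMergeCnt (x :: xs) ys; (y :: r.1, r.2 + (x :: xs).length)

def ktSortCnt (xs : List Int) : List Int × Int :=
  if xs.length ≤ 1 then (xs, 0)
  else
    let mid := xs.length / 2
    let l := ktSortCnt (xs.take mid)
    let r := ktSortCnt (xs.drop mid)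
    let m := ktMergeCnt l.1 r.1
    (m.1, l.2 + r.2 + m.2)
termination_by xs.length
decreasing_by
  · simp; omega
  · simp; omega

-- B raises the same ValueError on unequal lengths (excluded by Pre_); the port returns 0 there.
def kt_distance_alt (perm1 : List Int) (perm2 : List Int) : Int :=
  if perm1.length ≠ perm2.length then 0
  else
    let seq := (PySem.List.sorted2 (perm1.zip perm2) Prod.fst Prod.snd).map Prod.snd
    (ktSortCnt seq).2

-- ===== PRECONDITION & SPEC =====
-- Both programs raise ValueError exactly on unequal lengths; Pre_ excludes exactly those inputs.
def Pre_kt_distance (perm1 : List Int) (perm2 : List Int) : Prop := perm1.length = perm2.length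
instance (perm1 : List Int) (perm2 : List Int) : Decidable (Pre_kt_distance perm1 perm2) := by unfold Pre_kt_distance; infer_instance
def pvWitness_kt_distance : List Int × List Int := ([2, 0, 1], [0, 1, 2])

def Spec_kt_distance (perm1 : List Int) (perm2 : List Int) (out : Int) : Prop := out = kt_distance_alt perm1 perm2
instance (perm1 : List Int) (perm2 : List Int) (out : Int) : Decidable (Spec_kt_distance perm1 perm2 out) := by unfold Spec_kt_distance; infer_instance

-- ===== CLAIM (what is proved, stated in full; the proofs are below) =====
def Claim_equal_kt_distance : Prop := ∀ (perm1 : List Int) (perm2 : List Int), Dom_kt_distance perm1 perm2 → Pre_kt_distance perm1 perm2 → Spec_kt_distance perm1 perm2 (kt_distance perm1 perm2)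

-- ===== LEMMAS AND PROOFS =====

def ktGt (a b : Int) : Bool := decide (b < a)
def ktPairCount {α : Type} (r : α → α → Bool) : List α → Nat
  | [] => 0
  | x :: xs => xs.countP (r x) + ktPairCount r xs
def ktCross {α : Type} (r : α → α → Bool) (l₁ l₂ : List α) : Nat :=
  (l₁.map (fun a => l₂.countP (r a))).sum

theorem ktPairCount_append {α : Type} (r : α → α → Bool) (l₁ l₂ : List α) :
    ktPairCount r (l₁ ++ l₂) = ktPairCount r l₁ + ktPairCount r l₂ + ktCross r l₁ l₂ := by
  induction l₁ with
  | nil => simp [ktPairCount, ktCross]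
  | cons x xs ih => simp [ktPairCount, ktCross, List.countP_append, ih, ktCross]; omega

theorem ktPairCount_perm {α : Type} (r : α → α → Bool) (hsymm : ∀ a b, r a b = r b a)
    {l l' : List α} (h : l.Perm l') : ktPairCount r l = ktPairCount r l' := by
  induction h with
  | nil => rfl
  | cons x h ih => simp [ktPairCount, ih, h.countP_eq]
  | swap x y l => simp [ktPairCount, List.countP_cons, hsymm x y]; omega
  | trans h1 h2 ih1 ih2 => omega

theorem ktPairCount_congr {α : Type} {R : α → α → Prop} (r₁ r₂ : α → α → Bool)
    {l : List α} (hp : l.Pairwise R) (h : ∀ a b, R a b → r₁ a b = r₂ a b) :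
    ktPairCount r₁ l = ktPairCount r₂ l := by
  induction l with
  | nil => rfl
  | cons x xs ih =>
    rw [List.pairwise_cons] at hp
    have hc : xs.countP (r₁ x) = xs.countP (r₂ x) :=
      List.countP_congr (fun b hb => by rw [h x b (hp.1 b hb)])
    simp [ktPairCount, ih hp.2, hc]

theorem ktPairCount_map {α β : Type} (r : β → β → Bool) (f : α → β) (l : List α) :
    ktPairCount r (l.map f) = ktPairCount (fun a b => r (f a) (f b)) l := by
  induction l with
  | nil => rfl
  | cons x xs ih => simp [ktPairCount, ih, List.countP_map]; rfl

theorem ktCross_perm {α : Type} (r : α → α → Bool) {l₁ l₁' l₂ l₂' : List α}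
    (h₁ : l₁.Perm l₁') (h₂ : l₂.Perm l₂') : ktCross r l₁ l₂ = ktCross r l₁' l₂' := by
  unfold ktCross
  have : ∀ a, l₂.countP (r a) = l₂'.countP (r a) := fun a => h₂.countP_eq _
  simp only [this]
  exact (h₁.map _).sum_eq

theorem ktMergeCnt_perm (l r : List Int) : (ktMergeCnt l r).1.Perm (l ++ r) := by
  fun_induction ktMergeCnt with
  | case1 ys => simp [ktMergeCnt]
  | case2 x xs => simp [ktMergeCnt]
  | case3 x xs y ys hle rr ih => simpa [ktMergeCnt, hle] using ih.cons x
  | case4 x xs y ys hle rr ih =>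
    simp only [ktMergeCnt, if_neg hle]
    refine (ih.cons y).trans ?_
    exact (List.perm_middle).symm

theorem ktMergeCnt_sorted : ∀ {l r : List Int}, l.Pairwise (· ≤ ·) → r.Pairwise (· ≤ ·) →
    (ktMergeCnt l r).1.Pairwise (· ≤ ·) := by
  intro l r hl hr
  fun_induction ktMergeCnt with
  | case1 ys => simpa using hr
  | case2 x xs => simpa using hl
  | case3 x xs y ys hle rr ih =>
    rw [List.pairwise_cons] at hl
    refine List.pairwise_cons.2 ⟨?_, ih hl.2 hr⟩
    intro b hb
    have hb' := (ktMergeCnt_perm xs (y :: ys)).mem_iff.1 hb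
    rcases List.mem_append.1 hb' with h1 | h2
    · exact hl.1 b h1
    · rcases List.mem_cons.1 h2 with rfl | h3
      · exact hle
      · exact le_trans hle ((List.pairwise_cons.1 hr).1 b h3)
  | case4 x xs y ys hle rr ih =>
    rw [List.pairwise_cons] at hr
    refine List.pairwise_cons.2 ⟨?_, ih hl hr.2⟩
    intro b hb
    have hb' := (ktMergeCnt_perm (x :: xs) ys).mem_iff.1 hb
    have hyx : y ≤ x := le_of_not_ge hle
    rcases List.mem_append.1 hb' with h1 | h2
    · rcases List.mem_cons.1 h1 with rfl | h3
      · exact hyx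
      · exact le_trans hyx ((List.pairwise_cons.1 hl).1 b h3)
    · exact hr.1 b h2

theorem ktSumIte (y : Int) (l : List Int) :
    (List.map (fun i => if ktGt i y = true then 1 else 0) l).sum = l.countP (fun a => ktGt a y) := by
  induction l with
  | nil => rfl
  | cons a t ih => simp [List.countP_cons, ih]; omega

theorem ktMergeCnt_cnt : ∀ {l r : List Int}, l.Pairwise (· ≤ ·) → r.Pairwise (· ≤ ·) →
    (ktMergeCnt l r).2 = (ktCross ktGt l r : Int) := by
  intro l r hl hr
  fun_induction ktMergeCnt with
  | case1 ys => simp [ktCross]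
  | case2 x xs => simp [ktCross, ktGt]
  | case3 x xs y ys hle rr ih =>
    rw [List.pairwise_cons] at hl
    have h0 : (y :: ys).countP (ktGt x) = 0 := by
      rw [List.countP_eq_zero]
      intro b hb
      rcases List.mem_cons.1 hb with rfl | h3
      · simp [ktGt]; omega
      · have := (List.pairwise_cons.1 hr).1 b h3
        simp [ktGt]; omega
    have hc : ktCross ktGt (x :: xs) (y :: ys) = ktCross ktGt xs (y :: ys) := by
      simp [ktCross, h0]
    simpa [hc] using ih hl.2 hr
  | case4 x xs y ys hle rr ih =>
    rw [List.pairwise_cons] at hr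
    have hyx : y < x := lt_of_not_ge hle
    -- every element of x :: xs is > y
    have hall : (x :: xs).countP (fun a => ktGt a y) = (x :: xs).length := by
      rw [List.countP_eq_length]
      intro a ha
      rcases List.mem_cons.1 ha with rfl | h3
      · simp [ktGt]; omega
      · have := (List.pairwise_cons.1 hl).1 a h3
        simp [ktGt]; omega
    have hsum := ktSumIte y xs
    have hsplit : ktCross ktGt (x :: xs) (y :: ys)
        = (x :: xs).countP (fun a => ktGt a y) + ktCross ktGt (x :: xs) ys := by
      simp [ktCross, List.countP_cons, hsum]
      omega
    rw [ih hl hr.2] at *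
    rw [hsplit, hall]
    push_cast
    ring

theorem ktSortCnt_spec (xs : List Int) :
    (ktSortCnt xs).1.Perm xs ∧ (ktSortCnt xs).1.Pairwise (· ≤ ·) ∧
      (ktSortCnt xs).2 = (ktPairCount ktGt xs : Int) := by
  fun_induction ktSortCnt with
  | case1 xs h =>
    refine ⟨List.Perm.refl xs, ?_, ?_⟩
    · rcases xs with _ | ⟨a, _ | ⟨b, t⟩⟩ <;> simp_all
    · rcases xs with _ | ⟨a, _ | ⟨b, t⟩⟩ <;> simp_all [ktPairCount]
  | case2 xs h mid l r m ih1 ih2 =>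
    obtain ⟨hp1, hs1, hc1⟩ := ih1
    obtain ⟨hp2, hs2, hc2⟩ := ih2
    have htd : xs.take mid ++ xs.drop mid = xs := List.take_append_drop _ _
    refine ⟨?_, ktMergeCnt_sorted hs1 hs2, ?_⟩
    · have hperm : (xs.take mid ++ xs.drop mid).Perm xs := by rw [htd]
      exact (ktMergeCnt_perm l.1 r.1).trans ((hp1.append hp2).trans hperm)
    · show l.2 + r.2 + m.2 = _
      have hca := ktPairCount_append ktGt (xs.take mid) (xs.drop mid)
      rw [htd] at hca
      rw [show m.2 = (ktMergeCnt l.1 r.1).2 from rfl, ktMergeCnt_cnt hs1 hs2,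
        ktCross_perm ktGt hp1 hp2, hc1, hc2, hca]
      push_cast
      ring

def ktLexLe (p q : Int × Int) : Prop := p.1 < q.1 ∨ (p.1 = q.1 ∧ p.2 ≤ q.2)
def ktLtB (p q : Int × Int) : Bool :=
  decide (p.1 < q.1) || (!decide (q.1 < p.1) && decide (p.2 < q.2))

theorem ktLtB_false_iff (p q : Int × Int) : ktLtB p q = false ↔ ktLexLe q p := by
  simp [ktLtB, ktLexLe]; omega

theorem ktLtB_true_imp {p q : Int × Int} (h : ktLtB p q = true) :
    p.1 < q.1 ∨ (p.1 = q.1 ∧ p.2 < q.2) := by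
  simp [ktLtB] at h; omega

theorem ktInsertBy_pairwise (x : Int × Int) (ys : List (Int × Int))
    (h : ys.Pairwise fun a b => ktLtB b a = false) :
    (PySem.List.insertBy ktLtB x ys).Pairwise fun a b => ktLtB b a = false := by
  induction ys with
  | nil => simp [PySem.List.insertBy]
  | cons y ys ih =>
    rw [List.pairwise_cons] at h
    by_cases hb : ktLtB x y = true
    · rw [show PySem.List.insertBy ktLtB x (y :: ys) = x :: y :: ys from by
        simp [PySem.List.insertBy, hb]]
      refine List.pairwise_cons.2 ⟨?_, List.pairwise_cons.2 ⟨h.1, h.2⟩⟩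
      intro b hb2
      have hxy := ktLtB_true_imp hb
      rw [ktLtB_false_iff]
      rcases List.mem_cons.1 hb2 with rfl | hmem
      · unfold ktLexLe; omega
      · have := (ktLtB_false_iff b y).1 (h.1 b hmem)
        unfold ktLexLe at *; omega
    · rw [show PySem.List.insertBy ktLtB x (y :: ys) = y :: PySem.List.insertBy ktLtB x ys from by
        simp [PySem.List.insertBy, hb]]
      refine List.pairwise_cons.2 ⟨?_, ih h.2⟩
      intro b hb2
      rcases (PySem.List.mem_insertBy ktLtB x b ys).1 hb2 with rfl | hmem
      · simpa using hb
      · exact h.1 b hmem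

theorem ktSorted2_eq (xs : List (Int × Int)) :
    PySem.List.sorted2 xs Prod.fst Prod.snd
      = xs.foldl (fun acc p => PySem.List.insertBy ktLtB p acc) [] := rfl

theorem ktFoldl_insert_pairwise (xs : List (Int × Int)) :
    ∀ acc, (acc.Pairwise fun a b => ktLtB b a = false) →
      ((xs.foldl (fun acc p => PySem.List.insertBy ktLtB p acc) acc).Pairwise
        fun a b => ktLtB b a = false) := by
  induction xs with
  | nil => exact fun acc h => h
  | cons x xs ih => exact fun acc h => ih _ (ktInsertBy_pairwise x acc h)

theorem ktSorted2_pairwise (xs : List (Int × Int)) :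
    (PySem.List.sorted2 xs Prod.fst Prod.snd).Pairwise ktLexLe := by
  rw [ktSorted2_eq]
  exact (ktFoldl_insert_pairwise xs [] (by simp)).imp
    (fun h => (ktLtB_false_iff _ _).1 h)

def ktDisc (p q : Int × Int) : Bool := decide ((p.1 - q.1) * (p.2 - q.2) < 0)

theorem ktDisc_symm (a b : Int × Int) : ktDisc a b = ktDisc b a := by
  have h : (a.1 - b.1) * (a.2 - b.2) = (b.1 - a.1) * (b.2 - a.2) := by ring
  simp only [ktDisc, h]

theorem ktLexLe_gt_eq_disc {a b : Int × Int} (h : ktLexLe a b) :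
    ktGt a.2 b.2 = ktDisc a b := by
  simp only [ktGt, ktDisc, decide_eq_decide, mul_neg_iff]
  unfold ktLexLe at h
  omega

-- index-based counting equals list counting
theorem ktCountIdx (p : Int × Int → Bool) (xs : List (Int × Int)) (d : Int × Int) :
    (List.range xs.length).countP (fun k => p (xs.getD k d)) = xs.countP p := by
  induction xs with
  | nil => simp
  | cons x t ih =>
    simp only [List.length_cons, List.range_succ_eq_map, List.countP_cons, List.countP_map]
    have : ((fun k => p ((x :: t).getD k d)) ∘ Nat.succ) = fun k => p (t.getD k d) := by
      funext k; simp
    rw [this, ih]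
    simp [List.countP_cons]

theorem ktRange_natCast (a b : Nat) :
    PySem.List.pyRange (a : Int) (b : Int) 1
      = (List.range (b - a)).map (fun k => ((a + k : Nat) : Int)) := by
  rw [PySem.List.pyRange_of_pos (a : Int) (b : Int) Int.one_pos]
  by_cases hab : a < b
  · rw [if_pos (by exact_mod_cast hab : (a : Int) < (b : Int))]
    rw [show (((b : Int) - a + 1 - 1) / 1).toNat = b - a by omega]
    apply List.map_congr_left
    intro k _
    push_cast
    ring
  · rw [if_neg (by exact_mod_cast hab : ¬ ((a : Int) < (b : Int)))]
    rw [show b - a = 0 by omega]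
    simp

-- the pure combinatorial core of A's double loop
theorem ktA_core (d : Int × Int) (L : List (Int × Int)) :
    ((List.range L.length).map (fun i =>
        (List.range' (i + 1) (L.length - (i + 1))).countP
          (fun k => ktDisc (L.getD i d) (L.getD k d)))).sum
      = ktPairCount ktDisc L := by
  induction L with
  | nil => simp [ktPairCount]
  | cons x xs ih =>
    simp only [List.length_cons, List.range_succ_eq_map, List.map_cons, List.sum_cons,
      List.map_map]
    have h0 : (List.range' (0 + 1) (xs.length + 1 - (0 + 1))).countP
        (fun k => ktDisc ((x :: xs).getD 0 d) ((x :: xs).getD k d))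
        = xs.countP (ktDisc x) := by
      have hr : List.range' 1 xs.length = (List.range xs.length).map (fun k => 1 + k) := by
        rw [List.range'_eq_map_range]
      simp only [Nat.zero_add, Nat.add_sub_cancel, hr, List.countP_map]
      have : ((fun k => ktDisc ((x :: xs).getD 0 d) ((x :: xs).getD k d)) ∘ fun k => 1 + k)
          = fun k => ktDisc x (xs.getD k d) := by
        funext k
        simp [Nat.add_comm 1 k]
      rw [this, ktCountIdx (ktDisc x) xs d]
    have hrest : ∀ i, ((fun i =>
          (List.range' (i + 1) (xs.length + 1 - (i + 1))).countP
            (fun k => ktDisc ((x :: xs).getD i d) ((x :: xs).getD k d))) ∘ Nat.succ) i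
        = (List.range' (i + 1) (xs.length - (i + 1))).countP
            (fun k => ktDisc (xs.getD i d) (xs.getD k d)) := by
      intro i
      have hr : List.range' (i + 1 + 1) (xs.length - (i + 1))
          = (List.range' (i + 1) (xs.length - (i + 1))).map (fun k => 1 + k) := by
        rw [List.map_add_range']
        congr 1
        omega
      have hlen : xs.length + 1 - (i + 1 + 1) = xs.length - (i + 1) := by omega
      simp only [Function.comp_apply, Nat.succ_eq_add_one, hlen, hr, List.countP_map]
      congr 1
      funext k
      simp [Nat.add_comm 1 k]
    rw [h0]
    have : (List.range xs.length).map ((fun i =>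
          (List.range' (i + 1) (xs.length + 1 - (i + 1))).countP
            (fun k => ktDisc ((x :: xs).getD i d) ((x :: xs).getD k d))) ∘ Nat.succ)
        = (List.range xs.length).map (fun i =>
          (List.range' (i + 1) (xs.length - (i + 1))).countP
            (fun k => ktDisc (xs.getD i d) (xs.getD k d))) := by
      apply List.map_congr_left
      intro i _
      exact hrest i
    rw [this, ih]
    rfl

theorem ktSumCast (l : List Nat) (c : Nat → Nat) :
    (l.map (fun i => ((c i : Nat) : Int))).sum = (((l.map c).sum : Nat) : Int) := by
  induction l with
  | nil => simp
  | cons a t ih => simp [ih]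

theorem ktFoldlCountIf (p : Nat → Prop) [DecidablePred p] (l : List Nat) (a : Int) :
    l.foldl (fun acc x => if p x then acc + 1 else acc) a
      = a + ((l.countP (fun x => decide (p x)) : Nat) : Int) := by
  have := PySem.List.foldl_count_if (fun x => decide (p x)) l a
  simpa using this

theorem ktZip_getD (p1 p2 : List Int) (h : p1.length = p2.length) {i : Nat}
    (hi : i < p1.length) :
    (p1.zip p2).getD i (0, 0) = (p1.getD i 0, p2.getD i 0) := by
  have hz : i < (p1.zip p2).length := by simp [List.length_zip]; omega
  rw [List.getD_eq_getElem _ _ hz, List.getD_eq_getElem _ _ hi,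
    List.getD_eq_getElem _ _ (by omega : i < p2.length)]
  exact List.getElem_zip

theorem ktA_eq (p1 p2 : List Int) (h : p1.length = p2.length) :
    kt_distance p1 p2 = ((ktPairCount ktDisc (p1.zip p2) : Nat) : Int) := by
  unfold kt_distance
  rw [if_neg (fun hne => hne h)]
  simp only [PySem.List.len_eq]
  set N := p1.length with hN
  have hzlen : (p1.zip p2).length = N := by simp [List.length_zip]; omega
  -- inner loop: for i < N the fold equals inv + (count of discordant j in (i+1..N))
  have hinner : ∀ (inv : Int), ∀ i ∈ List.range N,
      (PySem.List.pyRange ((i : Int) + 1) (N : Int) 1).foldl (fun inv j =>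
        if (PySem.List.pyGetD p1 (i : Int) 0 - PySem.List.pyGetD p1 j 0) *
           (PySem.List.pyGetD p2 (i : Int) 0 - PySem.List.pyGetD p2 j 0) < 0
        then inv + 1 else inv) inv
      = inv + (((List.range' (i + 1) (N - (i + 1))).countP
          (fun k => ktDisc ((p1.zip p2).getD i (0, 0)) ((p1.zip p2).getD k (0, 0))) : Nat) : Int) := by
    intro inv i hi
    have hiN : i < N := List.mem_range.1 hi
    rw [show ((i : Int) + 1) = (((i + 1 : Nat) : Int)) by push_cast; ring]
    rw [ktRange_natCast (i + 1) N, List.foldl_map]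
    simp only [PySem.List.pyGetD_natCast]
    rw [ktFoldlCountIf]
    congr 1
    have hcnt : ∀ k ∈ List.range (N - (i + 1)),
        (decide ((p1.getD i 0 - p1.getD (i + 1 + k) 0) *
            (p2.getD i 0 - p2.getD (i + 1 + k) 0) < 0))
        = ktDisc ((p1.zip p2).getD i (0, 0)) ((p1.zip p2).getD (i + 1 + k) (0, 0)) := by
      intro k hk
      have hkN : i + 1 + k < N := by have := List.mem_range.1 hk; omega
      rw [ktZip_getD p1 p2 h hiN, ktZip_getD p1 p2 h hkN]
      simp [ktDisc]
    have hq : (List.range (N - (i + 1))).countP (fun k =>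
            decide ((p1.getD i 0 - p1.getD (i + 1 + k) 0) *
              (p2.getD i 0 - p2.getD (i + 1 + k) 0) < 0))
        = (List.range' (i + 1) (N - (i + 1))).countP
            (fun k => ktDisc ((p1.zip p2).getD i (0, 0)) ((p1.zip p2).getD k (0, 0))) :=
      calc (List.range (N - (i + 1))).countP (fun k =>
            decide ((p1.getD i 0 - p1.getD (i + 1 + k) 0) *
              (p2.getD i 0 - p2.getD (i + 1 + k) 0) < 0))
          = (List.range (N - (i + 1))).countP (fun k =>
              ktDisc ((p1.zip p2).getD i (0, 0)) ((p1.zip p2).getD (i + 1 + k) (0, 0))) :=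
            List.countP_congr (fun k hk => by rw [hcnt k hk])
        _ = (List.range' (i + 1) (N - (i + 1))).countP
              (fun k => ktDisc ((p1.zip p2).getD i (0, 0)) ((p1.zip p2).getD k (0, 0))) := by
            rw [List.range'_eq_map_range, List.countP_map]
            rfl
    rw [hq]
  rw [PySem.List.pyRange_zero_natCast N, List.foldl_map,
    PySem.List.foldl_congr_mem _ _ _ _ hinner, PySem.List.foldl_add]
  rw [ktSumCast]
  rw [show (List.range N).map (fun i => (List.range' (i + 1) (N - (i + 1))).countP
        (fun k => ktDisc ((p1.zip p2).getD i (0, 0)) ((p1.zip p2).getD k (0, 0))))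
      = (List.range (p1.zip p2).length).map (fun i =>
          (List.range' (i + 1) ((p1.zip p2).length - (i + 1))).countP
            (fun k => ktDisc ((p1.zip p2).getD i (0, 0)) ((p1.zip p2).getD k (0, 0))))
      from by rw [hzlen]]
  rw [ktA_core (0, 0) (p1.zip p2)]
  simp

theorem ktB_eq (p1 p2 : List Int) (h : p1.length = p2.length) :
    kt_distance_alt p1 p2 = ((ktPairCount ktDisc (p1.zip p2) : Nat) : Int) := by
  unfold kt_distance_alt
  rw [if_neg (fun hne => hne h)]
  show (ktSortCnt ((PySem.List.sorted2 (p1.zip p2) Prod.fst Prod.snd).map Prod.snd)).2 = _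
  obtain ⟨hp, hs, hc⟩ :=
    ktSortCnt_spec ((PySem.List.sorted2 (p1.zip p2) Prod.fst Prod.snd).map Prod.snd)
  rw [hc]
  congr 1
  rw [ktPairCount_map]
  rw [ktPairCount_congr (R := ktLexLe) _ ktDisc (ktSorted2_pairwise (p1.zip p2))
    (fun a b hab => ktLexLe_gt_eq_disc hab)]
  exact ktPairCount_perm ktDisc ktDisc_symm (PySem.List.sorted2_perm _ _ _ _)

-- ===== VERDICT (by name: the statement is the Claim_ definition above) =====
theorem kt_distance_spec : Claim_equal_kt_distance := by
  intro perm1 perm2 _ hpre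
  unfold Spec_kt_distance
  rw [ktA_eq perm1 perm2 hpre, ktB_eq perm1 perm2 hpre]
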